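-- pv_equiv track=rewrite | github.com/hobi2k/TTS_RP_Model_Lab | system/webapi/demo.py | _normalize_emotion
-- ===== SOURCE A (Python) =====
-- from typing import Any
--
-- def _normalize_emotion(raw: Any) -> dict[str, int]:
--     out = {"neutral": 1, "sad": 0, "happy": 0, "angry": 0}
--     if not isinstance(raw, dict):
--         return out
--     for key in out:
--         out[key] = 1 if int(raw.get(key, 0)) > 0 else 0
--     if sum(out.values()) == 0:
--         out["neutral"] = 1
--     if sum(out.values()) > 1:
--         # Ensure one-hot by priority: angry > sad > happy > neutral.
--         if out["angry"]:
--             return {"neutral": 0, "sad": 0, "happy": 0, "angry": 1}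
--         if out["sad"]:
--             return {"neutral": 0, "sad": 1, "happy": 0, "angry": 0}
--         if out["happy"]:
--             return {"neutral": 0, "sad": 0, "happy": 1, "angry": 0}
--         return {"neutral": 1, "sad": 0, "happy": 0, "angry": 0}
--     return out
-- ===== SOURCE B (Python) =====
-- _PRIORITY = ("angry", "sad", "happy", "neutral")
-- _KEYS = ("neutral", "sad", "happy", "angry")
--
--
-- def _normalize_emotion(raw):
--     if not isinstance(raw, dict):
--         return {"neutral": 1, "sad": 0, "happy": 0, "angry": 0}
--     hot = next((k for k in _PRIORITY if int(raw.get(k, 0)) > 0), "neutral")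
--     return {k: int(k == hot) for k in _KEYS}
-- ===== Notes on version B (the rewrite author's own statement) =====
-- stated objective: simpler
-- what changed: Replaces A's flag-building loop plus two sum() checks and a nested priority branch by a single first-match scan of the priority list (angry, sad, happy, neutral) followed by a one-hot dict comprehension.
import Mathlib
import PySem

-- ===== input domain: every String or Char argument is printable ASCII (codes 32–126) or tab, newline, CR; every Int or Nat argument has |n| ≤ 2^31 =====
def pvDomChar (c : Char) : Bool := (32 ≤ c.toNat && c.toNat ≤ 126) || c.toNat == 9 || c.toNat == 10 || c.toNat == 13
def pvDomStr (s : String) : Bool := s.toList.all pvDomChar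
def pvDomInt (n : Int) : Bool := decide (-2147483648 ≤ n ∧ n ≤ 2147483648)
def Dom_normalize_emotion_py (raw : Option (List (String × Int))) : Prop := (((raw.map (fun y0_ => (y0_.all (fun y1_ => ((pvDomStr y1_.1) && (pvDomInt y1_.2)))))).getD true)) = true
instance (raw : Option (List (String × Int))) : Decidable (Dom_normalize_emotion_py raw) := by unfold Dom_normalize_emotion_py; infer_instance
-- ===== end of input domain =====

-- B replaces A's flag loop + two sum() checks + nested priority branch by a single
-- first-match scan of the priority list and a one-hot comprehension (objective: simpler).

-- ===== PORT A =====
def normalize_emotion_py (raw : Option (List (String × Int))) : List (String × Int) :=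
  let out0 : PySem.Dict String Int :=
    PySem.Dict.ofList [("neutral", 1), ("sad", 0), ("happy", 0), ("angry", 0)]
  match raw with
  | none => out0.items
  | some lst =>
    let d : PySem.Dict String Int := PySem.Dict.ofList lst
    -- for key in out: out[key] = 1 if int(raw.get(key, 0)) > 0 else 0
    let out := ["neutral", "sad", "happy", "angry"].foldl
      (fun o k => o.insert k (if 0 < d.getD k 0 then 1 else 0)) out0
    -- if sum(out.values()) == 0: out["neutral"] = 1
    let out := if out.values.sum = 0 then out.insert "neutral" 1 else out
    -- if sum(out.values()) > 1: priority chain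
    if 1 < out.values.sum then
      if out.getD "angry" 0 ≠ 0 then [("neutral", 0), ("sad", 0), ("happy", 0), ("angry", 1)]
      else if out.getD "sad" 0 ≠ 0 then [("neutral", 0), ("sad", 1), ("happy", 0), ("angry", 0)]
      else if out.getD "happy" 0 ≠ 0 then [("neutral", 0), ("sad", 0), ("happy", 1), ("angry", 0)]
      else [("neutral", 1), ("sad", 0), ("happy", 0), ("angry", 0)]
    else out.items

-- ===== PORT B =====
def normalize_emotion_py_alt (raw : Option (List (String × Int))) : List (String × Int) :=
  match raw with
  | none => [("neutral", 1), ("sad", 0), ("happy", 0), ("angry", 0)]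
  | some lst =>
    let d : PySem.Dict String Int := PySem.Dict.ofList lst
    -- hot = next((k for k in _PRIORITY if int(raw.get(k, 0)) > 0), "neutral")
    let hot := (["angry", "sad", "happy", "neutral"].find?
      (fun k => decide (0 < d.getD k 0))).getD "neutral"
    -- {k: int(k == hot) for k in _KEYS}
    ["neutral", "sad", "happy", "angry"].map (fun k => (k, if k == hot then (1 : Int) else 0))

-- ===== PRECONDITION & SPEC =====
def Spec_normalize_emotion_py (raw : Option (List (String × Int))) (out : List (String × Int)) : Prop := out = normalize_emotion_py_alt raw
instance (raw : Option (List (String × Int))) (out : List (String × Int)) : Decidable (Spec_normalize_emotion_py raw out) := by unfold Spec_normalize_emotion_py; infer_instance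

-- ===== CLAIM (what is proved, stated in full; the proofs are below) =====
def Claim_equal_normalize_emotion_py : Prop := ∀ (raw : Option (List (String × Int))), Dom_normalize_emotion_py raw → Spec_normalize_emotion_py raw (normalize_emotion_py raw)

-- ===== LEMMAS AND PROOFS =====
lemma core (lst : List (String × Int)) :
    normalize_emotion_py (some lst) = normalize_emotion_py_alt (some lst) := by
  by_cases hn : 0 < (PySem.Dict.ofList lst).getD "neutral" 0 <;>
  by_cases hs : 0 < (PySem.Dict.ofList lst).getD "sad" 0 <;>
  by_cases hh : 0 < (PySem.Dict.ofList lst).getD "happy" 0 <;>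
  by_cases ha : 0 < (PySem.Dict.ofList lst).getD "angry" 0 <;>
  simp only [normalize_emotion_py, normalize_emotion_py_alt, hn, hs, hh, ha,
    List.foldl, List.find?, if_pos, if_neg, decide_true, decide_false,
    PySem.Dict.getD_insert] <;> decide

-- ===== VERDICT (by name: the statement is the Claim_ definition above) =====
theorem normalize_emotion_py_spec : Claim_equal_normalize_emotion_py := by
  intro raw _
  unfold Spec_normalize_emotion_py
  cases raw with
  | none => rfl
  | some lst => exact core lst
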